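-- pv_equiv track=rewrite | github.com/mrowl/filmdata | filmdata/metric/person.py | _get_source_titles_index
-- ===== SOURCE A (Python) =====
-- def _get_source_titles_index(titles, group):
--     source_index = {}
--     for title in titles:
--         for source_name, source_rating in title['rating'].items():
--             if not source_name in source_index:
--                 source_index[source_name] = []
--             source_index[source_name].append(source_rating)
--     return source_index
-- ===== SOURCE B (Python) =====
-- def _get_source_titles_index(titles, group):
--     pairs = [item for title in titles for item in title['rating'].items()]
--     names = list(dict.fromkeys(name for name, _ in pairs))
--     return {name: [r for n, r in pairs if n == name] for name in names}
-- ===== Notes on version B (the rewrite author's own statement) =====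
-- stated objective: alternative
-- what changed: A builds the per-source index incrementally with a membership-guarded dict append inside the nested loop; B instead flattens all (name, rating) pairs into one list, takes the distinct names in first-occurrence order, and builds each dict entry by filtering the flat list.
import Mathlib
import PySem

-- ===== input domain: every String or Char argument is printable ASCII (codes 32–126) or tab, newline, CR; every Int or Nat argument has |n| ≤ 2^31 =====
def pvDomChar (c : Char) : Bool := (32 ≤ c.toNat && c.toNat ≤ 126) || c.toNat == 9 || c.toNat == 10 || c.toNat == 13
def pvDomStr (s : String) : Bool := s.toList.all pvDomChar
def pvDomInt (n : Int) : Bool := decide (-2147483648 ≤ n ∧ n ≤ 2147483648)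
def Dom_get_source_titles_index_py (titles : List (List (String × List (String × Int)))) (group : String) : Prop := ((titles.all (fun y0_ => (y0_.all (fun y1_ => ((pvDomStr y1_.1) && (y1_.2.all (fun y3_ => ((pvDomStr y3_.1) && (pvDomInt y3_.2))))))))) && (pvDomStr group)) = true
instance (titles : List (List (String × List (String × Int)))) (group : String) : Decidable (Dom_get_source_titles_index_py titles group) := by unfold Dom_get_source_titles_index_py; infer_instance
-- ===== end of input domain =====

-- B replaces A's incremental dict-building loop by a flatten / ordered-distinct-names / per-name-filter
-- decomposition (objective: alternative, same result, no speed claim).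

-- ===== PORT A =====
-- A: build source_index incrementally: for each title, for each (name, rating) in title['rating'],
-- append rating to source_index[name] (creating [] on first sight of name).
def get_source_titles_index_py (titles : List (List (String × List (String × Int)))) (group : String) : List (String × List Int) :=
  (titles.foldl
    (fun d title =>
      ((PySem.Dict.mk title).getD "rating" []).foldl
        (fun d p =>
          (if !d.contains p.1 then d.insert p.1 [] else d).modify p.1 [] (fun l => l ++ [p.2]))
        d)
    PySem.Dict.empty).items

-- ===== PORT B =====
-- B: flatten all (name, rating) pairs, take the distinct names in first-occurrence order,
-- and build each entry by filtering the flat pair list.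
def get_source_titles_index_py_alt (titles : List (List (String × List (String × Int)))) (group : String) : List (String × List Int) :=
  let pairs := titles.flatMap (fun title => (PySem.Dict.mk title).getD "rating" [])
  let names := PySem.List.dedup (pairs.map Prod.fst)
  names.map (fun name => (name, (pairs.filter (fun p => p.1 == name)).map (fun p => p.2)))

-- ===== PRECONDITION & SPEC =====
-- Pre_ excludes only inputs where some title lacks a 'rating' key: there Python A raises KeyError
-- (and B raises too); no input on which A returns is excluded.
def Pre_get_source_titles_index_py (titles : List (List (String × List (String × Int)))) (group : String) : Prop :=
  ∀ title ∈ titles, (PySem.Dict.mk title).contains "rating" = true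

instance (titles : List (List (String × List (String × Int)))) (group : String) : Decidable (Pre_get_source_titles_index_py titles group) := by unfold Pre_get_source_titles_index_py; infer_instance

def pvWitness_get_source_titles_index_py : (List (List (String × List (String × Int)))) × String :=
  ([[("rating", [("imdb", 7), ("flixster", 9)])], [("rating", [("imdb", 5)])]], "director")

def Spec_get_source_titles_index_py (titles : List (List (String × List (String × Int)))) (group : String) (out : List (String × List Int)) : Prop := out = get_source_titles_index_py_alt titles group
instance (titles : List (List (String × List (String × Int)))) (group : String) (out : List (String × List Int)) : Decidable (Spec_get_source_titles_index_py titles group out) := by unfold Spec_get_source_titles_index_py; infer_instance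

-- ===== CLAIM (what is proved, stated in full; the proofs are below) =====
def Claim_equal_get_source_titles_index_py : Prop := ∀ (titles : List (List (String × List (String × Int)))) (group : String), Dom_get_source_titles_index_py titles group → Pre_get_source_titles_index_py titles group → Spec_get_source_titles_index_py titles group (get_source_titles_index_py titles group)

-- ===== LEMMAS AND PROOFS =====

-- A's membership-guarded "insert [] then append" step is (items-)equal to a plain modify step.
theorem pv_step_eq {K : Type} [BEq K] [LawfulBEq K] (d : PySem.Dict K (List Int)) (k : K) (r : Int) :
    (if !d.contains k then d.insert k [] else d).modify k [] (fun l => l ++ [r])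
      = d.modify k [] (fun l => l ++ [r]) := by
  by_cases h : d.contains k
  · simp [h]
  · have h' : d.contains k = false := by simpa using h
    simp [h', PySem.Dict.modify, PySem.Dict.getD_insert_self, PySem.Dict.insert_insert_self,
      PySem.Dict.getD_of_not_contains _ _ h']

-- nested foldl over titles = foldl over the flattened pair list
theorem pv_foldl_flatMap {α β σ : Type} (f : α → List β) (g : σ → β → σ) (l : List α) (s : σ) :
    l.foldl (fun s a => (f a).foldl g s) s = (l.flatMap f).foldl g s := by
  induction l generalizing s with
  | nil => rfl
  | cons a t ih => simp [List.flatMap_cons, List.foldl_append, ih]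

theorem pv_main (pairs : List (String × Int)) :
    (pairs.foldl (fun d p => d.modify p.1 [] (fun l => l ++ [p.2])) PySem.Dict.empty).items
      = (PySem.List.dedup (pairs.map Prod.fst)).map
          (fun name => (name, (pairs.filter (fun p => p.1 == name)).map (fun p => p.2))) := by
  have hnd := PySem.Dict.nodup_keys_foldl_modify_key pairs Prod.fst [] (fun _ p l => l ++ [p.2])
    PySem.Dict.empty PySem.Dict.nodup_keys_empty
  have hkeys := PySem.Dict.keys_foldl_modify_key pairs Prod.fst [] (fun _ p l => l ++ [p.2])
    PySem.Dict.empty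
  rw [PySem.Dict.items_eq_map_keys _ hnd [], hkeys, PySem.List.dedup_eq_ofList]
  have hupd : PySem.Set.update (PySem.Dict.empty : PySem.Dict String (List Int)).keys (pairs.map Prod.fst)
      = PySem.Set.ofList (pairs.map Prod.fst) := rfl
  rw [hupd]
  refine List.map_congr_left (fun k _ => ?_)
  simp [PySem.Dict.getD_foldl_modify_append, PySem.Dict.getD_empty]

-- ===== VERDICT (by name: the statement is the Claim_ definition above) =====
theorem get_source_titles_index_py_spec : Claim_equal_get_source_titles_index_py := by
  intro titles group _ _
  unfold Spec_get_source_titles_index_py get_source_titles_index_py get_source_titles_index_py_alt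
  simp only [pv_step_eq]
  rw [pv_foldl_flatMap, pv_main]
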